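-- pv_equiv track=rewrite | github.com/raeez/chiral-bar-cobar | compute/lib/bar_gf_algebraicity.py | betagamma_bar_dims
-- ===== SOURCE A (Python) =====
-- from typing import Dict, List, Optional, Tuple
--
-- def betagamma_bar_dims(N: int) -> List[int]:
--     r"""H^n(B(betagamma)): coefficients of sqrt((1+x)/(1-3x)).
--
--     Rank = 2 (two generators beta, gamma).
--     GF Q(x) = sqrt((1+x)/(1-3x)) satisfies (1-3x)Q^2 - (1+x) = 0,
--     with discriminant (inside Q^2 equation) related to (1-3x)(1+x).
--     Recurrence: n*a(n) = 2n*a(n-1) + 3(n-2)*a(n-2), a(1)=2, a(0)=1.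
--     """
--     a = [0] * (N + 1)
--     a[0] = 1
--     if N >= 1:
--         a[1] = 2
--     for n in range(2, N + 1):
--         a[n] = (2 * n * a[n - 1] + 3 * (n - 2) * a[n - 2]) // n
--     return a[1:N + 1]
-- ===== SOURCE B (Python) =====
-- def betagamma_bar_dims(N):
--     # Q(x) = sqrt((1+x)/(1-3x)) = (1+x)/sqrt(1-2x-3x^2), so a_n = T(n) + T(n-1)
--     # where T are the central trinomial coefficients:
--     # (n+1)*T(n+1) = (2n+1)*T(n) + 3n*T(n-1), T(0) = T(1) = 1 (division exact).
--     out = []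
--     t0, t1 = 1, 1
--     for n in range(1, N + 1):
--         out.append(t0 + t1)
--         t0, t1 = t1, ((2 * n + 1) * t1 + 3 * n * t0) // (n + 1)
--     return out
-- ===== Notes on version B (the rewrite author's own statement) =====
-- stated objective: alternative
-- what changed: B computes a_n = T(n)+T(n-1) via the central trinomial coefficients of the factorisation Q=(1+x)/sqrt(1-2x-3x^2), maintained as a rolling pair with their own recurrence, instead of A's indexed array recurrence on a itself with division by n and slicing.
import Mathlib
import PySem

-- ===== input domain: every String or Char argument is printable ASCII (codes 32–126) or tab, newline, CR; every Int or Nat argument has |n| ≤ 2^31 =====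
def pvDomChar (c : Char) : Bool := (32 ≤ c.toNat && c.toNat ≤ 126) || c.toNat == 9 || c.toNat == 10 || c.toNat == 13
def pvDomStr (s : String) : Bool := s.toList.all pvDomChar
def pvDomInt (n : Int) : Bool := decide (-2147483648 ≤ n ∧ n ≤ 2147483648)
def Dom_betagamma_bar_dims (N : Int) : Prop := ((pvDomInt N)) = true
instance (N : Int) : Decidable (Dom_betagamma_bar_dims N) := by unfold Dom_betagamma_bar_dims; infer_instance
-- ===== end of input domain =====

-- B computes the coefficients through the factorisation Q = (1+x)/sqrt(1-2x-3x^2):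
-- a_n = T(n)+T(n-1) with T the central trinomial coefficients and their own recurrence,
-- a rolling pair instead of A's indexed array recurrence on a itself;
-- equivalent on every nonnegative N (on negative N the Python A raises IndexError, B returns []).

-- ===== PORT A =====
-- loop body of A: a[n] = (2*n*a[n-1] + 3*(n-2)*a[n-2]) // n
def fA : List Int → Int → List Int := fun a n =>
  PySem.List.pySetD a n
    (PySem.Int.floordiv
      (2 * n * PySem.List.pyGetD a (n - 1) 0 + 3 * (n - 2) * PySem.List.pyGetD a (n - 2) 0) n)

-- a = [0]*(N+1); a[0]=1; if N>=1: a[1]=2; for n in range(2,N+1): <fA>; return a[1:N+1]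
-- index reads/writes are in range whenever N >= 0 (Pre_); pySetD/pyGetD are exact there.
def betagamma_bar_dims (N : Int) : List Int :=
  let a : List Int := List.replicate (N + 1).toNat 0
  let a := PySem.List.pySetD a 0 1
  let a := if N ≥ 1 then PySem.List.pySetD a 1 2 else a
  let a := (PySem.List.pyRange 2 (N + 1) 1).foldl fA a
  PySem.List.slice a (some 1) (some (N + 1))

-- ===== PORT B =====
-- loop body of B, state (out, t0, t1): out.append(t0+t1); t0, t1 = t1, ((2n+1)*t1 + 3n*t0)//(n+1)
def fB : List Int × Int × Int → Int → List Int × Int × Int := fun s n =>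
  (s.1 ++ [s.2.1 + s.2.2], s.2.2,
   PySem.Int.floordiv ((2 * n + 1) * s.2.2 + 3 * n * s.2.1) (n + 1))

-- out = []; t0, t1 = 1, 1; for n in range(1,N+1): <fB>; return out
def betagamma_bar_dims_alt (N : Int) : List Int :=
  ((PySem.List.pyRange 1 (N + 1) 1).foldl fB ([], 1, 1)).1

-- ===== PRECONDITION & SPEC =====
-- Pre_: nonnegative N — on negative N the Python A raises IndexError (writing a[0] into an empty list); B returns [] there.
def Pre_betagamma_bar_dims (N : Int) : Prop := 0 ≤ N
instance (N : Int) : Decidable (Pre_betagamma_bar_dims N) := by unfold Pre_betagamma_bar_dims; infer_instance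
def pvWitness_betagamma_bar_dims : Int := 5

def Spec_betagamma_bar_dims (N : Int) (out : List Int) : Prop := out = betagamma_bar_dims_alt N
instance (N : Int) (out : List Int) : Decidable (Spec_betagamma_bar_dims N out) := by unfold Spec_betagamma_bar_dims; infer_instance

-- ===== CLAIM (what is proved, stated in full; the proofs are below) =====
def Claim_equal_betagamma_bar_dims : Prop := ∀ (N : Int), Dom_betagamma_bar_dims N → Pre_betagamma_bar_dims N → Spec_betagamma_bar_dims N (betagamma_bar_dims N)

-- ===== LEMMAS AND PROOFS =====

def qseq : Nat → ℚ
  | 0 => 1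
  | 1 => 2
  | (n+2) => (2 * (n+2) * qseq (n+1) + 3 * n * qseq n) / (n+2)
def Sconv (n : Nat) : ℚ := ∑ k ∈ Finset.range (n+1), qseq k * qseq (n-k)
def Uconv (n : Nat) : ℚ := ∑ k ∈ Finset.range (n+1), (k : ℚ) * qseq k * qseq (n-k)

lemma qseq_rec (n : Nat) :
    ((n : ℚ) + 2) * qseq (n+2) = 2 * ((n : ℚ) + 2) * qseq (n+1) + 3 * n * qseq n := by
  have h : ((n:ℚ) + 2) ≠ 0 := by positivity
  show ((n : ℚ) + 2) * ((2 * (↑n+2) * qseq (n+1) + 3 * ↑n * qseq n) / (↑n+2)) = _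
  · field_simp

lemma nS_eq_2U (n : Nat) : (n : ℚ) * Sconv n = 2 * Uconv n := by
  have hrefl : ∑ k ∈ Finset.range (n+1), ((n-k : Nat) : ℚ) * qseq (n-k) * qseq k = Uconv n := by
    have h1 : ∑ k ∈ Finset.range (n+1), ((n-k : Nat) : ℚ) * qseq (n-k) * qseq k
        = ∑ k ∈ Finset.range (n+1), ((n-k : Nat) : ℚ) * qseq (n-k) * qseq (n - (n-k)) := by
      refine Finset.sum_congr rfl (fun k hk => ?_)
      have hk' : k ≤ n := by simpa [Nat.lt_succ_iff] using hk
      rw [Nat.sub_sub_self hk']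
    rw [h1]
    exact Finset.sum_range_reflect (fun j => ((j : Nat) : ℚ) * qseq j * qseq (n - j)) (n+1)
  unfold Sconv
  rw [Finset.mul_sum]
  have h2 : ∀ k ∈ Finset.range (n+1), (n:ℚ) * (qseq k * qseq (n-k))
      = (k:ℚ) * qseq k * qseq (n-k) + ((n-k : Nat):ℚ) * qseq (n-k) * qseq k := by
    intro k hk
    have hk' : k ≤ n := by simpa [Nat.lt_succ_iff] using hk
    have hc : ((n-k:Nat):ℚ) = (n:ℚ) - k := by
      have := Nat.cast_sub (R := ℚ) hk'; rw [this]
    rw [hc]; ring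
  rw [Finset.sum_congr rfl h2, Finset.sum_add_distrib, hrefl]
  unfold Uconv; ring

lemma U_rec (n : Nat) : Uconv (n+2) = 2 * Uconv (n+1) + 2 * Sconv (n+1) + 3 * Uconv n := by
  have hT : Uconv (n+1) + Sconv (n+1)
      = (∑ i ∈ Finset.range (n+1), ((i:ℚ)+2) * qseq (i+1) * qseq (n-i)) + qseq (n+1) := by
    have h1 : Uconv (n+1) + Sconv (n+1)
        = ∑ k ∈ Finset.range (n+2), ((k:ℚ)+1) * qseq k * qseq (n+1-k) := by
      unfold Uconv Sconv
      rw [← Finset.sum_add_distrib]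
      refine Finset.sum_congr rfl (fun k _ => ?_); ring
    rw [h1, Finset.sum_range_succ']
    simp [qseq]
    refine Finset.sum_congr rfl (fun i _ => ?_)
    ring_nf
  have hexp : Uconv (n+2)
      = (∑ i ∈ Finset.range (n+1), (((i:ℚ)+2) * qseq (i+2)) * qseq (n-i)) + qseq 1 * qseq (n+1) := by
    unfold Uconv
    rw [Finset.sum_range_succ', Finset.sum_range_succ']
    simp
    refine Finset.sum_congr rfl (fun i _ => ?_)
    ring_nf
  rw [hexp]
  have hstep : ∀ i ∈ Finset.range (n+1),
      (((i:ℚ)+2) * qseq (i+2)) * qseq (n-i)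
      = 2 * (((i:ℚ)+2) * qseq (i+1) * qseq (n-i)) + 3 * ((i:ℚ) * qseq i * qseq (n-i)) := by
    intro i _
    rw [qseq_rec i]; ring
  rw [Finset.sum_congr rfl hstep, Finset.sum_add_distrib, ← Finset.mul_sum, ← Finset.mul_sum]
  have : (∑ i ∈ Finset.range (n+1), ((i:ℚ)+2) * qseq (i+1) * qseq (n-i))
      = Uconv (n+1) + Sconv (n+1) - qseq (n+1) := by rw [hT]; ring
  rw [this]
  show _ + qseq 1 * qseq (n+1) = _
  unfold Uconv
  simp [qseq]
  ring

lemma S_step : ∀ n : Nat, Sconv (n+2) = 3 * Sconv (n+1) := by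
  intro n
  induction n with
  | zero => simp [Sconv, Finset.sum_range_succ, qseq]; norm_num
  | succ n IH =>
    have e1 := nS_eq_2U (n+3)
    have e2 := U_rec (n+1)
    simp only [show n+1+2 = n+3 from rfl, show n+1+1 = n+2 from rfl] at e2
    have e3 := nS_eq_2U (n+2)
    have e4 := nS_eq_2U (n+1)
    have key : ((n:ℚ)+3) * Sconv (n+3) = ((n:ℚ)+3) * (3 * Sconv (n+2)) := by
      push_cast at e1 e3 e4
      linear_combination e1 + 2*e2 - 2*e3 - 3*e4 - ((n:ℚ)+1)*IH
    have hne : ((n:ℚ)+3) ≠ 0 := by positivity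
    exact mul_left_cancel₀ hne key

lemma S_closed (n : Nat) : Sconv (n+1) = 4 * 3 ^ n := by
  induction n with
  | zero => simp [Sconv, Finset.sum_range_succ, qseq]; norm_num
  | succ n IH => rw [S_step n, IH]; ring

lemma S_peel (m : Nat) :
    Sconv (m+1) = 2 * qseq (m+1) + ∑ k ∈ Finset.range m, qseq (k+1) * qseq (m-k) := by
  unfold Sconv
  rw [Finset.sum_range_succ', Finset.sum_range_succ]
  simp [qseq]
  ring

def zseq (n : Nat) : Int := (qseq n).num

lemma z_spec : ∀ n : Nat, (zseq n : ℚ) = qseq n ∧ (n ≠ 0 → 2 ∣ zseq n) := by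
  intro n
  induction n using Nat.strong_induction_on with
  | _ n IH =>
    match n with
    | 0 => exact ⟨by simp [zseq, qseq], fun h => absurd rfl h⟩
    | (m+1) =>
      have hinner : ∑ k ∈ Finset.range m, qseq (k+1) * qseq (m-k)
          = ((∑ k ∈ Finset.range m, zseq (k+1) * zseq (m-k) : ℤ) : ℚ) := by
        push_cast
        refine Finset.sum_congr rfl (fun k hk => ?_)
        have hk' : k < m := Finset.mem_range.mp hk
        rw [(IH (k+1) (by omega)).1, (IH (m-k) (by omega)).1]
      have hdvd : (4 : ℤ) ∣ ∑ k ∈ Finset.range m, zseq (k+1) * zseq (m-k) := by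
        refine Finset.dvd_sum (fun k hk => ?_)
        have hk' : k < m := Finset.mem_range.mp hk
        have h1 := (IH (k+1) (by omega)).2 (by omega)
        have h2 := (IH (m-k) (by omega)).2 (by omega)
        exact (show (4:ℤ) = 2*2 by norm_num) ▸ mul_dvd_mul h1 h2
      obtain ⟨Y, hY⟩ := hdvd
      have hq : qseq (m+1) = ((2 * 3 ^ m - 2 * Y : ℤ) : ℚ) := by
        have h1 := S_peel m
        rw [S_closed m, hinner, hY] at h1
        push_cast at h1 ⊢
        linarith
      have hz : zseq (m+1) = 2 * 3 ^ m - 2 * Y := by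
        unfold zseq; rw [hq, Rat.num_intCast]
      refine ⟨by rw [hq, hz], fun _ => ?_⟩
      rw [hz]; exact Dvd.dvd.sub (Dvd.intro _ rfl) (Dvd.intro _ rfl)

lemma z0 : zseq 0 = 1 := by norm_num [zseq, qseq]
lemma z1 : zseq 1 = 2 := by norm_num [zseq, qseq]

lemma zrec (t : Nat) :
    ((t:ℤ)+2) * zseq (t+2) = 2 * ((t:ℤ)+2) * zseq (t+1) + 3 * t * zseq t := by
  have h : ((((t:ℤ)+2) * zseq (t+2) : ℤ) : ℚ)
      = ((2 * ((t:ℤ)+2) * zseq (t+1) + 3 * t * zseq t : ℤ) : ℚ) := by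
    push_cast
    rw [(z_spec (t+2)).1, (z_spec (t+1)).1, (z_spec t).1]
    exact qseq_rec t
  exact_mod_cast h

def Lz (m : Nat) : List Int := (List.range m).map zseq

lemma Lz_getD' (m j : Nat) (hj : j < m) (d : Int) : (Lz m).getD j d = zseq j := by
  simp [Lz, List.getD, hj]

lemma Lz_length (m : Nat) : (Lz m).length = m := by simp [Lz]

lemma Lz_succ (m : Nat) : Lz (m+1) = Lz m ++ [zseq m] := by simp [Lz, List.range_succ]

lemma fA_step (M t : Nat) (ht : t + 2 ≤ M) :
    fA (Lz (t+2) ++ List.replicate (M-1-t) 0) ((t:Int)+2) = Lz (t+3) ++ List.replicate (M-1-(t+1)) 0 := by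
  set st := Lz (t+2) ++ List.replicate (M-1-t) 0 with hst
  have hlen : (Lz (t+2)).length = t+2 := Lz_length _
  have hget : ∀ j : Nat, j < t+2 → PySem.List.pyGetD st ((j:Nat):Int) 0 = zseq j := by
    intro j hj
    rw [PySem.List.pyGetD_natCast, hst, List.getD_append _ _ _ _ (by rw [hlen]; omega), Lz_getD' _ _ hj]
  have h1 : (t:Int)+2-1 = (((t+1:Nat)):Int) := by omega
  have h2 : (t:Int)+2-2 = ((t:Nat):Int) := by omega
  show PySem.List.pySetD st ((t:Int)+2) _ = _
  rw [h1, h2, hget (t+1) (by omega), hget t (by omega)]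
  have hnum : 2 * ((t:Int)+2) * zseq (t+1) + 3 * ((t:Nat):Int) * zseq t = ((t:Int)+2) * zseq (t+2) := by
    rw [zrec t]
  have hv : PySem.Int.floordiv (((t:Int)+2) * zseq (t+2)) ((t:Int)+2) = zseq (t+2) := by
    rw [PySem.Int.floordiv_eq_ediv_of_pos (by omega)]
    exact Int.mul_ediv_cancel_left _ (by omega)
  have hc : (t:Int)+2 = (((t+2:Nat)):Int) := by omega
  rw [hnum, hv, hc, PySem.List.pySetD_natCast]
  rw [hst, List.set_append_right _ _ (by rw [hlen])]
  rw [hlen, Nat.sub_self]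
  have hrep : M-1-t = (M-2-t)+1 := by omega
  rw [hrep, List.replicate_succ, List.set_cons_zero]
  rw [show t+3 = (t+2)+1 from rfl, Lz_succ (t+2)]
  have : M-1-(t+1) = M-2-t := by omega
  rw [this, List.append_assoc]
  rfl

lemma A_inv (M : Nat) (hM : 1 ≤ M) : ∀ t : Nat, t ≤ M - 1 →
    (PySem.List.pyRange 2 ((t:Int)+2) 1).foldl fA (Lz 2 ++ List.replicate (M-1) 0)
      = Lz (t+2) ++ List.replicate (M-1-t) 0 := by
  intro t
  induction t with
  | zero => intro _; simp [PySem.List.pyRange_one_eq_nil]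
  | succ t IH =>
    intro ht
    have hcast : ((t+1:Nat):Int)+2 = ((t:Int)+2)+1 := by push_cast; ring
    rw [hcast, PySem.List.pyRange_one_succ_right (by omega), List.foldl_append, IH (by omega)]
    show fA (Lz (t+2) ++ List.replicate (M-1-t) 0) ((t:Int)+2) = _
    rw [fA_step M t (by omega)]


-- central trinomial sequence over ℚ and its integer values
def tq : Nat → ℚ
  | 0 => 1
  | 1 => 1
  | (m+2) => ((2*m+3) * tq (m+1) + 3*(m+1) * tq m) / (m+2)

lemma tq_rec (m : Nat) :
    ((m:ℚ)+2) * tq (m+2) = (2*(m:ℚ)+3) * tq (m+1) + 3*((m:ℚ)+1) * tq m := by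
  have h : ((m:ℚ) + 2) ≠ 0 := by positivity
  show ((m:ℚ)+2) * (((2 * (m:ℚ) + 3) * tq (m+1) + 3 * ((m:ℚ) + 1) * tq m) / ((m:ℚ) + 2)) = _
  field_simp

lemma q_eq_t : ∀ n : Nat, qseq (n+1) = tq (n+1) + tq n := by
  have key : ∀ n : Nat, qseq (n+1) = tq (n+1) + tq n ∧ qseq (n+2) = tq (n+2) + tq (n+1) := by
    intro n
    induction n with
    | zero =>
      constructor
      · norm_num [qseq, tq]
      · show qseq 2 = tq 2 + tq 1
        norm_num [qseq, tq]
    | succ n IH =>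
      refine ⟨IH.2, ?_⟩
      have h1 := qseq_rec (n+1)
      have h2 := tq_rec (n+1)
      have h3 := tq_rec n
      push_cast at h1 h2 h3
      have key2 : ((n:ℚ)+3) * qseq (n+3) = ((n:ℚ)+3) * (tq (n+3) + tq (n+2)) := by
        linear_combination h1 + 2*((n:ℚ)+3)*IH.2 + 3*((n:ℚ)+1)*IH.1 - h2 - h3
      have hne : ((n:ℚ)+3) ≠ 0 := by positivity
      exact mul_left_cancel₀ hne key2
  exact fun n => (key n).1

def tz : Nat → Int
  | 0 => 1
  | (n+1) => zseq (n+1) - tz n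

lemma tz_cast : ∀ n : Nat, (tz n : ℚ) = tq n := by
  intro n
  induction n with
  | zero => norm_num [tz, tq]
  | succ n IH =>
    show ((zseq (n+1) - tz n : Int) : ℚ) = tq (n+1)
    push_cast
    rw [IH, (z_spec (n+1)).1, q_eq_t n]
    ring

lemma tz_rec (m : Nat) :
    ((m:Int)+2) * tz (m+2) = (2*(m:Int)+3) * tz (m+1) + 3*((m:Int)+1) * tz m := by
  have h : ((((m:Int)+2) * tz (m+2) : Int) : ℚ)
      = (((2*(m:Int)+3) * tz (m+1) + 3*((m:Int)+1) * tz m : Int) : ℚ) := by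
    push_cast
    rw [tz_cast (m+2), tz_cast (m+1), tz_cast m]
    exact tq_rec m
  exact_mod_cast h

lemma a_split (n : Nat) : tz n + tz (n+1) = zseq (n+1) := by
  show tz n + (zseq (n+1) - tz n) = zseq (n+1)
  ring

def Az (m : Nat) : List Int := (List.range m).map (fun i => zseq (i+1))

lemma fB_step (m : Nat) :
    fB (Az m, tz m, tz (m+1)) ((m:Int)+1) = (Az (m+1), tz (m+1), tz (m+2)) := by
  unfold fB
  refine Prod.ext ?_ (Prod.ext rfl ?_)
  · show Az m ++ [tz m + tz (m+1)] = Az (m+1)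
    rw [a_split m]
    simp [Az, List.range_succ]
  · show PySem.Int.floordiv ((2 * ((m:Int)+1) + 1) * tz (m+1) + 3 * ((m:Int)+1) * tz m) (((m:Int)+1) + 1)
        = tz (m+2)
    have hnum : (2 * ((m:Int)+1) + 1) * tz (m+1) + 3 * ((m:Int)+1) * tz m
        = (((m:Int)+1) + 1) * tz (m+2) := by
      rw [show ((m:Int)+1) + 1 = (m:Int)+2 by ring, tz_rec m]; ring
    rw [hnum, PySem.Int.floordiv_eq_ediv_of_pos (by omega)]
    exact Int.mul_ediv_cancel_left _ (by omega)

lemma B_inv : ∀ m : Nat, (PySem.List.pyRange 1 ((m:Int)+1) 1).foldl fB ([], 1, 1)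
    = (Az m, tz m, tz (m+1)) := by
  intro m
  induction m with
  | zero =>
    rw [PySem.List.pyRange_one_eq_nil (by norm_num)]
    have h1 : tz 1 = 1 := by show zseq 1 - tz 0 = 1; rw [z1]; decide
    simp only [List.foldl_nil]
    rw [h1]
    rfl
  | succ m IH =>
    have hcast : (((m+1:Nat)):Int)+1 = ((m:Int)+1)+1 := by push_cast; ring
    rw [hcast, PySem.List.pyRange_one_succ_right (by omega), List.foldl_append, IH]
    show fB (Az m, tz m, tz (m+1)) ((m:Int)+1) = _
    rw [fB_step m]

lemma B_val (N : Int) (h : 0 ≤ N) : betagamma_bar_dims_alt N = Az N.toNat := by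
  have hN : N = ((N.toNat : Nat) : Int) := (Int.toNat_of_nonneg h).symm
  show ((PySem.List.pyRange 1 (N + 1) 1).foldl fB ([], 1, 1)).1 = _
  rw [hN, B_inv N.toNat, Int.toNat_natCast]

lemma Lz_drop (M : Nat) : (Lz (M+1)).drop 1 = Az M := by
  simp [Lz, Az, List.range_succ_eq_map, List.map_map, Function.comp]

lemma A_val (N : Int) (h : 1 ≤ N) : betagamma_bar_dims N = (Lz (N.toNat + 1)).drop 1 := by
  have hM : 1 ≤ N.toNat := by omega
  have hN : N = ((N.toNat : Nat) : Int) := (Int.toNat_of_nonneg (by omega)).symm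
  have h1 : (N + 1).toNat = N.toNat + 1 := by omega
  show PySem.List.slice
      ((PySem.List.pyRange 2 (N + 1) 1).foldl fA
        (if N ≥ 1 then PySem.List.pySetD (PySem.List.pySetD (List.replicate (N + 1).toNat 0) 0 1) 1 2
         else PySem.List.pySetD (List.replicate (N + 1).toNat 0) 0 1)) (some 1) (some (N + 1)) = _
  rw [if_pos h, h1]
  have hinit : PySem.List.pySetD (PySem.List.pySetD (List.replicate (N.toNat + 1) (0:Int)) 0 1) 1 2
      = Lz 2 ++ List.replicate (N.toNat - 1) 0 := by
    rw [PySem.List.pySetD_of_nonneg _ _ (by norm_num), PySem.List.pySetD_of_nonneg _ _ (by norm_num)]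
    rw [List.replicate_succ, Int.toNat_zero, Int.toNat_one, List.set_cons_zero]
    have : N.toNat = (N.toNat - 1) + 1 := by omega
    rw [this, List.replicate_succ, List.set_cons_succ, List.set_cons_zero]
    simp [Lz, List.range_succ, z0, z1]
  rw [hinit]
  have h2 : N + 1 = (((N.toNat - 1 : Nat)) : Int) + 2 := by omega
  rw [h2, A_inv N.toNat hM (N.toNat - 1) (le_refl _)]
  have h3 : N.toNat - 1 - (N.toNat - 1) = 0 := by omega
  rw [h3, List.replicate_zero, List.append_nil]
  have h4 : (N.toNat - 1) + 2 = N.toNat + 1 := by omega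
  rw [h4]
  rw [PySem.List.slice_toNat _ (by norm_num) (by omega)]
  have h5 : ((((N.toNat - 1 : Nat)) : Int) + 2).toNat - (1:Int).toNat = N.toNat := by omega
  rw [h5]
  refine List.take_of_length_le ?_
  simp [Lz]


-- ===== VERDICT (by name: the statement is the Claim_ definition above) =====
theorem betagamma_bar_dims_spec : Claim_equal_betagamma_bar_dims := by
  intro N _ hpre
  unfold Spec_betagamma_bar_dims
  rcases eq_or_lt_of_le (show (0:Int) ≤ N from hpre) with h0 | h1
  · rw [← h0]; decide
  · rw [A_val N (by omega), B_val N (by omega), Lz_drop]
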